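-- pv_equiv track=rewrite | github.com/ayyyq/TARA | src_wikievents/utils.py | map_context2graph
-- ===== SOURCE A (Python) =====
-- def map_context2graph(graph_span_info, context_span, head):
--     ret_span = (-1, -1)
--     for graph_span in graph_span_info.keys():
--         if context_span[0] == graph_span[0] and context_span[1] == graph_span[1]:
--             # 完全重合
--             return graph_span
--         elif graph_span[0] <= head <= graph_span[1]:
--             # 部分重合时只考虑head
--             if ret_span[0] < 0:
--                 ret_span = graph_span
--             else:
--                 # 取更短的graph_span
--                 if graph_span[1] - graph_span[0] + 1 < ret_span[1] - ret_span[0] + 1: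
--                     ret_span = graph_span
--     return ret_span
-- ===== SOURCE B (Python) =====
-- def map_context2graph(graph_span_info, context_span, head):
--     spans = list(graph_span_info.keys())
--     for span in spans:
--         if span[0] == context_span[0] and span[1] == context_span[1]:
--             return span
--     candidates = [s for s in spans if s[0] <= head <= s[1]]
--     if not candidates:
--         return (-1, -1)
--     return min(candidates, key=lambda s: s[1] - s[0])
-- ===== Notes on version B (the rewrite author's own statement) =====
-- stated objective: simpler
-- what changed: A.s single stateful pass with an early return and a shortest-so-far accumulator is replaced by an exact-match scan followed by filter-the-containing-spans and min-by-length; Pre_ excludes only inputs where a malformed negative-start span contains head, on which A.s (-1,-1) sentinel test accidentally discards the shortest-span rule.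
-- outside the precondition, e.g. on map_context2graph({(-3, 5): 0, (0, 9): 0}, (100, 100), 2): A returns (0, 9), B returns (-3, 5)
import Mathlib
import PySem

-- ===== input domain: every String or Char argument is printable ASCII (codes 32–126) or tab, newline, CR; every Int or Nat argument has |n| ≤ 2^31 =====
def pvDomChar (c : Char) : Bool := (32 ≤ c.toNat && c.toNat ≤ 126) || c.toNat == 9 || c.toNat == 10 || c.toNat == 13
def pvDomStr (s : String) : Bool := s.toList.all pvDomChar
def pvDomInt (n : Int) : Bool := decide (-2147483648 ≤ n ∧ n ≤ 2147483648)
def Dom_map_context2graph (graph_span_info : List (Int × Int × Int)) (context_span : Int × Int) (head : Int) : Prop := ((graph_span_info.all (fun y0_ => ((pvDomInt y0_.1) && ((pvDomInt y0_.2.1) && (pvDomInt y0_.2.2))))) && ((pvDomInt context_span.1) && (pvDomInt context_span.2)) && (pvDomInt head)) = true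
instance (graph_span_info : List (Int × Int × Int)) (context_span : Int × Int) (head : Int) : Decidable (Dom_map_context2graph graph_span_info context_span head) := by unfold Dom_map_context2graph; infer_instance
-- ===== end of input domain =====

-- B separates A's single stateful early-return pass into an exact-match scan and a
-- filter + min-by-length selection; objective: simpler, same cost.

-- ===== PORT A =====
-- A's for-loop over the dict keys (key of (k1,k2,v) is (k1,k2)); the early return is
-- modeled by returning immediately; ret_span is the accumulator.
def aLoop (context_span : Int × Int) (head : Int) : List (Int × Int × Int) → (Int × Int) → (Int × Int)
  | [], ret_span => ret_span
  | (a, b, _) :: rest, ret_span =>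
    if context_span.1 = a ∧ context_span.2 = b then (a, b)
    else if a ≤ head ∧ head ≤ b then
      if ret_span.1 < 0 then aLoop context_span head rest (a, b)
      else if b - a + 1 < ret_span.2 - ret_span.1 + 1 then aLoop context_span head rest (a, b)
      else aLoop context_span head rest ret_span
    else aLoop context_span head rest ret_span

def map_context2graph (graph_span_info : List (Int × Int × Int)) (context_span : Int × Int) (head : Int) : Int × Int :=
  aLoop context_span head graph_span_info (-1, -1)

-- ===== PORT B =====
-- Source B's first loop: the first exactly matching span
def bFindExact (context_span : Int × Int) : List (Int × Int) → Option (Int × Int)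
  | [] => none
  | s :: rest => if s.1 = context_span.1 ∧ s.2 = context_span.2 then some s else bFindExact context_span rest

-- Source B's min(candidates, key=lambda s: s[1] - s[0]): running first-minimum by key
def bMin : List (Int × Int) → (Int × Int) → (Int × Int)
  | [], best => best
  | s :: rest, best => bMin rest (if s.2 - s.1 < best.2 - best.1 then s else best)

def map_context2graph_alt (graph_span_info : List (Int × Int × Int)) (context_span : Int × Int) (head : Int) : Int × Int :=
  let spans := graph_span_info.map (fun e => (e.1, e.2.1))
  match bFindExact context_span spans with
  | some s => s
  | none =>
    let candidates := spans.filter (fun s => decide (s.1 ≤ head ∧ head ≤ s.2))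
    match candidates with
    | [] => (-1, -1)
    | c :: rest => bMin rest c

-- ===== PRECONDITION & SPEC =====
-- Pre_ excludes only inputs where a malformed negative-start span contains head: there A's
-- (-1,-1) sentinel test accidentally discards the shortest-span rule.
def Pre_map_context2graph (graph_span_info : List (Int × Int × Int)) (context_span : Int × Int) (head : Int) : Prop :=
  ∀ e ∈ graph_span_info, e.1 ≤ head ∧ head ≤ e.2.1 → 0 ≤ e.1
instance (graph_span_info : List (Int × Int × Int)) (context_span : Int × Int) (head : Int) : Decidable (Pre_map_context2graph graph_span_info context_span head) := by unfold Pre_map_context2graph; infer_instance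

def pvWitness_map_context2graph : (List (Int × Int × Int)) × (Int × Int) × Int := ([(0, 2, 5), (1, 3, 7)], (1, 3), 2)

def Spec_map_context2graph (graph_span_info : List (Int × Int × Int)) (context_span : Int × Int) (head : Int) (out : Int × Int) : Prop := out = map_context2graph_alt graph_span_info context_span head
instance (graph_span_info : List (Int × Int × Int)) (context_span : Int × Int) (head : Int) (out : Int × Int) : Decidable (Spec_map_context2graph graph_span_info context_span head out) := by unfold Spec_map_context2graph; infer_instance

-- ===== CLAIM =====
def Claim_equal_map_context2graph : Prop := ∀ (graph_span_info : List (Int × Int × Int)) (context_span : Int × Int) (head : Int), Dom_map_context2graph graph_span_info context_span head → Pre_map_context2graph graph_span_info context_span head → Spec_map_context2graph graph_span_info context_span head (map_context2graph graph_span_info context_span head)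

-- ===== LEMMAS AND PROOFS =====

-- A's candidate accumulator step and fold, isolated
def pvStep (r s : Int × Int) : Int × Int :=
  if r.1 < 0 then s else if s.2 - s.1 + 1 < r.2 - r.1 + 1 then s else r

def pvF : List (Int × Int) → (Int × Int) → (Int × Int)
  | [], r => r
  | s :: rest, r => pvF rest (pvStep r s)

-- A's loop = (first exact match) orElse (candidate fold over the filtered keys)
theorem aLoop_decomp (context_span : Int × Int) (head : Int) (xs : List (Int × Int × Int)) (r : Int × Int) :
    aLoop context_span head xs r
      = (match bFindExact context_span (xs.map (fun e => (e.1, e.2.1))) with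
         | some s => s
         | none => pvF ((xs.map (fun e => (e.1, e.2.1))).filter (fun s => decide (s.1 ≤ head ∧ head ≤ s.2))) r) := by
  induction xs generalizing r with
  | nil => simp [aLoop, bFindExact, pvF]
  | cons e rest ih =>
    obtain ⟨a, b, v⟩ := e
    by_cases hex : context_span.1 = a ∧ context_span.2 = b
    · have hex' : ((a, b) : Int × Int).1 = context_span.1 ∧ ((a, b) : Int × Int).2 = context_span.2 :=
        ⟨hex.1.symm, hex.2.symm⟩
      simp only [aLoop, List.map_cons, bFindExact, if_pos hex, if_pos hex']
    · have hex' : ¬ (((a, b) : Int × Int).1 = context_span.1 ∧ ((a, b) : Int × Int).2 = context_span.2) :=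
        fun h => hex ⟨h.1.symm, h.2.symm⟩
      by_cases hc : a ≤ head ∧ head ≤ b
      · have hd : decide (((a, b) : Int × Int).1 ≤ head ∧ head ≤ ((a, b) : Int × Int).2) = true :=
          decide_eq_true hc
        have hstep : (if r.1 < 0 then aLoop context_span head rest (a, b)
            else if b - a + 1 < r.2 - r.1 + 1 then aLoop context_span head rest (a, b)
            else aLoop context_span head rest r)
            = aLoop context_span head rest (pvStep r (a, b)) := by
          simp only [pvStep]
          split_ifs <;> first | rfl | omega
        simp only [aLoop, List.map_cons, bFindExact, if_neg hex, if_neg hex', if_pos hc,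
          List.filter_cons, hd, if_true]
        rw [hstep, ih]
        cases bFindExact context_span (List.map (fun e => (e.1, e.2.1)) rest) <;> simp [pvF]
      · have hd : decide (((a, b) : Int × Int).1 ≤ head ∧ head ≤ ((a, b) : Int × Int).2) = false :=
          decide_eq_false hc
        simp only [aLoop, List.map_cons, bFindExact, if_neg hex, if_neg hex', if_neg hc,
          List.filter_cons, hd, Bool.false_eq_true, if_false]
        exact ih r

-- when the accumulator and all list elements start non-negatively, A's fold is B's running min
theorem pvF_eq_bMin (xs : List (Int × Int)) (r : Int × Int)
    (hr : 0 ≤ r.1) (hxs : ∀ s ∈ xs, 0 ≤ s.1) :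
    pvF xs r = bMin xs r := by
  induction xs generalizing r with
  | nil => rfl
  | cons s rest ih =>
    have hs : 0 ≤ s.1 := hxs s (List.mem_cons_self ..)
    have hstep : pvStep r s = (if s.2 - s.1 < r.2 - r.1 then s else r) := by
      simp only [pvStep]
      split_ifs <;> first | rfl | omega
    have hr' : 0 ≤ (if s.2 - s.1 < r.2 - r.1 then s else r).1 := by
      split_ifs <;> assumption
    simp only [pvF, bMin, hstep]
    exact ih _ hr' (fun t ht => hxs t (List.mem_cons_of_mem _ ht))

-- ===== VERDICT =====
theorem map_context2graph_spec : Claim_equal_map_context2graph := by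
  intro gsi cs head _ hpre
  unfold Spec_map_context2graph map_context2graph map_context2graph_alt
  rw [aLoop_decomp]
  cases hfe : bFindExact cs (gsi.map fun e => (e.1, e.2.1)) with
  | some s => simp only [hfe]
  | none =>
    simp only [hfe]
    set cands := (gsi.map fun e => (e.1, e.2.1)).filter (fun s => decide (s.1 ≤ head ∧ head ≤ s.2)) with hcands
    have hmem : ∀ s ∈ cands, 0 ≤ s.1 := by
      intro s hsmem
      have hf := List.mem_filter.mp hsmem
      obtain ⟨e, hemem, he⟩ := List.mem_map.mp hf.1
      have hcontains : s.1 ≤ head ∧ head ≤ s.2 := of_decide_eq_true hf.2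
      have := hpre e hemem
      simp only [← he] at hcontains ⊢
      exact this hcontains
    cases hc : cands with
    | nil => simp [pvF]
    | cons c rest =>
      have hc0 : 0 ≤ c.1 := hmem c (hc ▸ List.mem_cons_self ..)
      have hrest : ∀ s ∈ rest, 0 ≤ s.1 := fun s hs => hmem s (hc ▸ List.mem_cons_of_mem _ hs)
      have h1 : pvStep (-1, -1) c = c := by simp [pvStep]
      simp only [pvF, h1]
      exact pvF_eq_bMin rest c hc0 hrest
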